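-- pv_equiv track=rewrite | github.com/sheng-fu/SPINN_type | python/spinn/data/nli/load_nli_data.py | process_parse
-- ===== SOURCE A (Python) =====
-- def process_parse(parse):
-- 	parse_output = ''
-- 	for i in range(len(parse)-1):
-- 		if parse[i+1] == ')':
-- 			parse_output = parse_output + parse[i]; parse_output = parse_output + ' '
-- 		else:
-- 			parse_output = parse_output + parse[i]
-- 	parse_output = parse_output + ')'
-- 	parse_output = parse_output.split(' ')
--
-- 	label_span = []
-- 	for i in range(len(parse_output)):
-- 		if parse_output[i][0] == '(':
-- 			label = parse_output[i]
-- 			paren_count = 0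
-- 			potential_span = parse_output[i:]
-- 			for j in range(len(potential_span)):
-- 				if potential_span[j][0] == '(':
-- 					paren_count += 1
-- 				elif potential_span[j] == ')':
-- 					paren_count = paren_count - 1
-- 				if paren_count == 0:
-- 					span = potential_span[:j]
-- 					break
-- 			span = [w for w in span if w[0] != '(']
-- 			span = [w.replace(')', '') for w in span]
-- 			span = list(filter(None, span))
--
-- 			label_span.append((label, span))
-- 	return label_span
-- ===== SOURCE B (Python) =====
-- def process_parse(parse):
--     # tokenize: insert a space before every ')' at index >= 1, replace the last
--     # original character by ')', then split on ' '  (linear, via join instead of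
--     # repeated string concatenation)
--     t = ''.join((' ' + c) if (c == ')' and i > 0) else c
--                 for i, c in enumerate(parse))
--     tokens = (t[:-1] + ')').split(' ')
--
--     # one recursive-descent pass: a label's span is every word token inside its
--     # balanced region; entries come out in opening (pre-order) position order
--     n = len(tokens)
--
--     def region(i):
--         # tokens[i] is a label; returns (entries of this region, its words, next index)
--         label = tokens[i]
--         words = []
--         entries = []
--         j = i + 1
--         while j < n:
--             tok = tokens[j]
--             if tok[:1] == '(':
--                 sub_entries, sub_words, j = region(j)
--                 entries.extend(sub_entries)
--                 words.extend(sub_words)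
--             elif tok == ')':
--                 j += 1
--                 break
--             else:
--                 w = tok.replace(')', '')
--                 if w:
--                     words.append(w)
--                 j += 1
--         return [(label, words)] + entries, words, j
--
--     out = []
--     i = 0
--     while i < n:
--         if tokens[i][:1] == '(':
--             entries, _, i = region(i)
--             out.extend(entries)
--         else:
--             i += 1
--     return out
-- ===== Notes on version B (the rewrite author's own statement) =====
-- stated objective: faster
-- what changed: A builds the token string by repeated O(n^2) concatenation and, for every label token, rescans the token suffix with a counter plus three cleaning passes; B tokenizes once with a linear join and does a single recursive-descent pass over the tokens that emits every (label, word-span) pair directly.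
-- outside the precondition, e.g. on process_parse('() (a bc'): A returns [('(', []), ('(a', [])], B returns [('(', []), ('(a', ['b'])]; on process_parse('a  b'): A raises IndexError, B returns []
import Mathlib
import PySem

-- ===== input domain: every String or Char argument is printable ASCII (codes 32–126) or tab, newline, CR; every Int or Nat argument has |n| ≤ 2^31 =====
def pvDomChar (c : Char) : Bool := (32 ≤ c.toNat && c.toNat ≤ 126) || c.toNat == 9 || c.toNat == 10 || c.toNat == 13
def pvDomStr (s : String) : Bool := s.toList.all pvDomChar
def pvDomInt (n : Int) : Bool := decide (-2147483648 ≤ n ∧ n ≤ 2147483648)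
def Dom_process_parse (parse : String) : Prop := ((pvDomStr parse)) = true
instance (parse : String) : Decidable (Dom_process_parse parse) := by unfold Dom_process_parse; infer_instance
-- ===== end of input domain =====

-- B re-implements A's per-label quadratic rescans (and quadratic string building) as one
-- linear tokenization plus one recursive-descent pass over the tokens.

-- ===== PORT A =====
-- tokens are kept as List Char (Python str ↔ List Char via toList / String.ofList)

-- first loop of A: parse_output built character by character, then split(' ')
def ppTokensA (parse : String) : List (List Char) :=
  let cs := parse.toList
  let po := (PySem.List.pyRange 0 (PySem.List.len cs - 1) 1).foldl
    (fun (po : List Char) i =>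
      if PySem.List.pyGetD cs (i + 1) ' ' = ')' then
        (po ++ [PySem.List.pyGetD cs i ' ']) ++ [' ']
      else po ++ [PySem.List.pyGetD cs i ' ']) []
  PySem.Chars.splitOn (po ++ [')']) [' ']

-- inner 'for j in range(len(potential_span))' with its break; none = loop fell through
-- (Python's 'span' then keeps its previous value)
def ppScanA (ps : List (List Char)) : List (List Char) → Nat → Int → Option (List (List Char))
  | [], _, _ => none
  | t :: rest, j, cnt =>
    let cnt' := if PySem.List.pyGet? t 0 = some '(' then cnt + 1
                else if t = [')'] then cnt - 1 else cnt
    if cnt' = 0 then some (PySem.List.slice ps none (some (j : Int)))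
    else ppScanA ps rest (j + 1) cnt'

-- second loop of A; state = (label_span, last value of the Python variable 'span':
-- none = not yet assigned (reading it then is A's NameError, excluded by Pre_)
def ppStepA (toks : List (List Char))
    (st : List (String × List String) × Option (List (List Char))) (i : Int) :
    List (String × List String) × Option (List (List Char)) :=
  let t := PySem.List.pyGetD toks i []
  if PySem.List.pyGet? t 0 = some '(' then
    let ps := PySem.List.slice toks (some i) none
    let spanRaw : List (List Char) :=
      match ppScanA ps ps 0 0 with
      | some s => s
      | none => st.2.getD []   -- none here is Python's NameError (outside Pre_)
    let span1 := spanRaw.filter (fun w => ¬ (PySem.List.pyGet? w 0 = some '('))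
    let span2 := span1.map (fun w => PySem.Chars.replace w [')'] [])
    let span3 := span2.filter (fun w => ¬ (w = []))
    (st.1 ++ [(String.ofList t, span3.map String.ofList)], some span3)
  else st

def ppOuterA (toks : List (List Char)) : List (String × List String) :=
  ((PySem.List.pyRange 0 (PySem.List.len toks) 1).foldl (ppStepA toks) ([], none)).1

def process_parse (parse : String) : List (String × List String) :=
  ppOuterA (ppTokensA parse)

-- ===== PORT B =====
-- tokenization of Source B: one join over enumerate, then [:-1] + ')', then split(' ')
def ppTokensB (parse : String) : List (List Char) :=
  let t := (PySem.List.enumerate parse.toList 0).flatMap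
    (fun ic => if ic.2 = ')' ∧ 0 < ic.1 then [' ', ic.2] else [ic.2])
  PySem.Chars.splitOn (PySem.List.slice t none (some (-1)) ++ [')']) [' ']

-- region / its while loop (Source B's recursive descent); fuel only totalizes the index
-- recursion, 2*len(tokens)+2 is always enough
mutual
def ppRegionB (toks : List (List Char)) :
    Nat → Nat → (List (String × List String) × List String × Nat)
  | 0, i => ([], [], i)
  | fuel + 1, i =>
    let label := PySem.List.pyGetD toks (i : Int) []
    let r := ppLoopB toks fuel (i + 1) [] []
    ((String.ofList label, r.2.1) :: r.1, r.2.1, r.2.2)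

def ppLoopB (toks : List (List Char)) :
    Nat → Nat → List String → List (String × List String) →
    (List (String × List String) × List String × Nat)
  | 0, j, words, entries => (entries, words, j)
  | fuel + 1, j, words, entries =>
    if h : j < toks.length then
      let tok := toks[j]
      if PySem.Chars.slice tok none (some 1) = ['('] then
        let r := ppRegionB toks fuel j
        ppLoopB toks fuel r.2.2 (words ++ r.2.1) (entries ++ r.1)
      else if tok = [')'] then (entries, words, j + 1)
      else
        let w := PySem.Chars.replace tok [')'] []
        ppLoopB toks fuel (j + 1) (if w = [] then words else words ++ [String.ofList w]) entries
    else (entries, words, j)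
end

-- top-level 'while i < n' of Source B
def ppTopB (toks : List (List Char)) :
    Nat → Nat → List (String × List String) → List (String × List String)
  | 0, _, acc => acc
  | fuel + 1, i, acc =>
    if h : i < toks.length then
      if PySem.Chars.slice toks[i] none (some 1) = ['('] then
        let r := ppRegionB toks fuel i
        ppTopB toks fuel r.2.2 (acc ++ r.1)
      else ppTopB toks fuel (i + 1) acc
    else acc

def process_parse_alt (parse : String) : List (String × List String) :=
  let toks := ppTokensB parse
  ppTopB toks (2 * toks.length + 2) 0 []

-- ===== PRECONDITION & SPEC =====
-- spec-side vocabulary (independent of both ports): the token list of a parse string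
-- and the paren balance of A's/B's counting
def pvTrans : List Char → List Char
  | [] => [')']
  | c :: rest =>
    (c :: rest.flatMap (fun d => if d = ')' then [' ', d] else [d])).dropLast ++ [')']

def pvToks (parse : String) : List (List Char) :=
  PySem.Chars.splitOn (pvTrans parse.toList) [' ']

def pvIsLab (t : List Char) : Bool := t.head? = some '('

-- balance of the first k tokens: labels opened minus ')' tokens seen
def pvSig (toks : List (List Char)) (k : Nat) : Int :=
  ((toks.take k).countP pvIsLab : Int) - ((toks.take k).countP (· == [')']) : Int)

-- the label token at i closes: its balance returns to its starting value
def pvBal (toks : List (List Char)) (i : Nat) : Prop :=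
  ∃ j ∈ List.range toks.length, i < j ∧ pvSig toks (j + 1) = pvSig toks i

-- Pre_ excludes inputs whose token list contains an empty token (A raises IndexError
-- indexing it) or an unbalanced label token: such strings are malformed parse strings,
-- on which A raises NameError (first label) or returns the previous label's leftover
-- span variable -- an accidental value, as is B's choice (the remaining words) there.
def Pre_process_parse (parse : String) : Prop :=
  ([] ∉ pvToks parse) ∧
  ∀ i ∈ List.range (pvToks parse).length,
    pvIsLab ((pvToks parse).getD i []) = true → pvBal (pvToks parse) i

instance (parse : String) : Decidable (Pre_process_parse parse) := by
  unfold Pre_process_parse pvBal; infer_instance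

def pvWitness_process_parse : String := "(a b)"

def Spec_process_parse (parse : String) (out : List (String × List String)) : Prop :=
  out = process_parse_alt parse

instance (parse : String) (out : List (String × List String)) :
    Decidable (Spec_process_parse parse out) := by
  unfold Spec_process_parse; infer_instance

-- ===== CLAIM (what is proved, stated in full; the proofs are below) =====
def Claim_equal_process_parse : Prop :=
  ∀ (parse : String), Dom_process_parse parse → Pre_process_parse parse →
    Spec_process_parse parse (process_parse parse)

-- ===== LEMMAS AND PROOFS =====

-- proof-side vocabulary
def pvTransGo : Char → List Char → List Char
  | _, [] => [')']
  | c, d :: rest => (if d = ')' then [c, ' '] else [c]) ++ pvTransGo d rest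

def pvDelta (t : List Char) : Int := if pvIsLab t then 1 else if t = [')'] then -1 else 0

-- j is the position where the label token at i closes: the FIRST return of the balance
def pvCloseAt (toks : List (List Char)) (i j : Nat) : Prop :=
  i < j ∧ j < toks.length ∧ pvSig toks (j + 1) = pvSig toks i ∧
    ∀ m ∈ List.range j, i ≤ m → pvSig toks (m + 1) ≠ pvSig toks i


-- proof-side helpers
def pvCleanTok (t : List Char) : Option (List Char) :=
  if pvIsLab t then none
  else if PySem.Chars.replace t [')'] [] = [] then none
  else some (PySem.Chars.replace t [')'] [])

def pvWordsSeg (toks : List (List Char)) (a b : Nat) : List (List Char) :=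
  ((toks.drop a).take (b - a)).filterMap pvCleanTok

def pvCloseDec (toks : List (List Char)) (i j : Nat) : Decidable (pvCloseAt toks i j) := by
  unfold pvCloseAt; infer_instance

def pvCloseIdx (toks : List (List Char)) (i : Nat) : Nat :=
  (((List.range toks.length).find?
    (fun j => @decide (pvCloseAt toks i j) (pvCloseDec toks i j))).getD toks.length)

def pvEntry (toks : List (List Char)) (i : Nat) : String × List String :=
  (String.ofList (toks.getD i []),
   (pvWordsSeg toks (i + 1) (pvCloseIdx toks i)).map String.ofList)

def pvSpecSeg (toks : List (List Char)) (a b : Nat) : List (String × List String) :=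
  if a < b then
    (if pvIsLab (toks.getD a []) then [pvEntry toks a] else []) ++ pvSpecSeg toks (a + 1) b
  else []
termination_by b - a

-- token-shape lemmas
theorem labGet (t : List Char) : (PySem.List.pyGet? t 0 = some '(') ↔ pvIsLab t = true := by
  cases t <;> simp [PySem.List.pyGet?, PySem.List.pyIdx?, pvIsLab]

theorem labSlice (t : List Char) :
    (PySem.Chars.slice t none (some 1) = ['(']) ↔ pvIsLab t = true := by
  cases t with
  | nil => simp [PySem.Chars.slice, PySem.List.slice, pvIsLab]
  | cons c cs =>
    have h1 : PySem.Chars.slice (c :: cs) none (some 1) = (c :: cs).take ((1 : Int)).toNat := by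
      simp [PySem.Chars.slice_eq_listSlice]
      exact PySem.List.slice_to (c :: cs) (by omega)
    rw [h1]
    simp [pvIsLab]

theorem pvDelta_of_lab (t : List Char) (h : pvIsLab t = true) : pvDelta t = 1 := by
  simp [pvDelta, h]

theorem pvDelta_close : pvDelta [')'] = -1 := by decide

theorem pvDelta_of_other (t : List Char) (h1 : pvIsLab t = false) (h2 : t ≠ [')']) :
    pvDelta t = 0 := by
  simp [pvDelta, h1, h2]

theorem pvDelta_cases (t : List Char) : pvDelta t = 1 ∨ pvDelta t = 0 ∨ pvDelta t = -1 := by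
  unfold pvDelta; split_ifs <;> simp

theorem eq_close_of_delta_neg (t : List Char) (h : pvDelta t < 0) :
    t = [')'] ∧ pvIsLab t = false := by
  unfold pvDelta at h
  split_ifs at h with h1 h2
  · omega
  · exact ⟨h2, by simpa using h1⟩
  · omega

theorem pvSig_zero (toks : List (List Char)) : pvSig toks 0 = 0 := by simp [pvSig]

theorem pvSig_succ (toks : List (List Char)) (k : Nat) (h : k < toks.length) :
    pvSig toks (k + 1) = pvSig toks k + pvDelta (toks.getD k []) := by
  have hget : toks.getD k [] = toks[k] := List.getD_eq_getElem toks [] h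
  have hsplit : toks.take (k + 1) = toks.take k ++ [toks[k]] := by
    rw [List.take_add_one, List.getElem?_eq_getElem h]
    rfl
  unfold pvSig
  rw [hsplit, List.countP_append, List.countP_append, hget]
  by_cases hl : pvIsLab toks[k] = true
  · have hne : ¬ (toks[k] = [')']) := by
      intro hq
      rw [hq] at hl
      exact absurd hl (by decide)
    have c1 : List.countP (fun t => pvIsLab t) [toks[k]] = 1 := by simp [hl]
    have c2 : List.countP (· == [')']) [toks[k]] = 0 := by simp [hne]
    rw [pvDelta_of_lab _ hl, c1, c2]
    push_cast
    ring
  · have hl' : pvIsLab toks[k] = false := by simpa using hl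
    have c1 : List.countP (fun t => pvIsLab t) [toks[k]] = 0 := by simp [hl']
    rw [c1]
    by_cases hq : toks[k] = [')']
    · have c2 : List.countP (· == [')']) [toks[k]] = 1 := by simp [hq]
      rw [c2, hq, pvDelta_close]
      push_cast
      ring
    · have c2 : List.countP (· == [')']) [toks[k]] = 0 := by simp [hq]
      rw [c2, pvDelta_of_other _ hl' hq]
      push_cast
      ring

theorem pvSig_drop (toks : List (List Char)) (i m : Nat) :
    pvSig (toks.drop i) m = pvSig toks (i + m) - pvSig toks i := by
  unfold pvSig
  rw [List.take_add, List.countP_append, List.countP_append]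
  push_cast
  ring

theorem pvSig_step_ge (toks : List (List Char)) (k : Nat) (h : k < toks.length) :
    pvSig toks k - 1 ≤ pvSig toks (k + 1) := by
  rw [pvSig_succ toks k h]
  rcases pvDelta_cases (toks.getD k []) with h1 | h1 | h1 <;> omega

theorem close_gt (toks : List (List Char)) (i j : Nat)
    (hlab : pvIsLab (toks.getD i []) = true) (hc : pvCloseAt toks i j) :
    ∀ m, i < m → m ≤ j → pvSig toks i < pvSig toks m := by
  obtain ⟨hij, hjn, _heq, hne⟩ := hc
  intro m
  induction m with
  | zero => omega
  | succ m ih =>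
    intro him hmj
    by_cases hmi : i < m
    · have h1 : pvSig toks i < pvSig toks m := ih hmi (by omega)
      have h2 : pvSig toks m - 1 ≤ pvSig toks (m + 1) := pvSig_step_ge toks m (by omega)
      have h3 : pvSig toks (m + 1) ≠ pvSig toks i :=
        hne m (List.mem_range.mpr (by omega)) (by omega)
      omega
    · have hmi' : m = i := by omega
      subst hmi'
      rw [pvSig_succ toks m (by omega), pvDelta_of_lab _ hlab]
      omega

theorem close_unique (toks : List (List Char)) (i j₁ j₂ : Nat)
    (h1 : pvCloseAt toks i j₁) (h2 : pvCloseAt toks i j₂) : j₁ = j₂ := by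
  obtain ⟨a1, a2, a3, a4⟩ := h1
  obtain ⟨b1, b2, b3, b4⟩ := h2
  by_contra hne
  rcases Nat.lt_or_ge j₁ j₂ with h | h
  · exact (b4 j₁ (List.mem_range.mpr h) (by omega)) a3
  · exact (a4 j₂ (List.mem_range.mpr (by omega)) (by omega)) b3

theorem pvBal_close (toks : List (List Char)) (i : Nat)
    (hl : pvIsLab (toks.getD i []) = true) (hi : i < toks.length) (h : pvBal toks i) :
    ∃ j, pvCloseAt toks i j := by
  have hP : ∃ j, i < j ∧ j < toks.length ∧ pvSig toks (j + 1) = pvSig toks i := by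
    obtain ⟨j, hjm, hij, heq⟩ := h
    exact ⟨j, hij, List.mem_range.mp hjm, heq⟩
  classical
  refine ⟨Nat.find hP, ?_, ?_, ?_, ?_⟩
  · exact (Nat.find_spec hP).1
  · exact (Nat.find_spec hP).2.1
  · exact (Nat.find_spec hP).2.2
  · intro m hmr him
    intro hcon
    by_cases hmi : i < m
    · exact Nat.find_min hP (List.mem_range.mp hmr)
        ⟨hmi, by have := (Nat.find_spec hP).2.1; have := List.mem_range.mp hmr; omega, hcon⟩
    · have hmi' : m = i := by omega
      subst hmi'
      have : pvSig toks (m + 1) = pvSig toks m + pvDelta (toks.getD m []) :=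
        pvSig_succ toks m hi
      rw [pvDelta_of_lab _ hl] at this
      omega

theorem pvCloseIdx_eq (toks : List (List Char)) (i j : Nat) (hc : pvCloseAt toks i j) :
    pvCloseIdx toks i = j := by
  unfold pvCloseIdx
  have hmem : j ∈ List.range toks.length := List.mem_range.mpr hc.2.1
  have hsome : ((List.range toks.length).find?
      (fun j => @decide (pvCloseAt toks i j) (pvCloseDec toks i j))).isSome := by
    rw [List.find?_isSome]
    exact ⟨j, hmem, by simpa using hc⟩
  obtain ⟨j', hj'⟩ := Option.isSome_iff_exists.mp hsome
  have hpj' : pvCloseAt toks i j' := by simpa using List.find?_some hj'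
  rw [hj']
  simpa using close_unique toks i j' j hpj' hc

-- the inner-scan step computes the balance delta
theorem scanStep (t : List Char) (c : Int) :
    (if PySem.List.pyGet? t 0 = some '(' then c + 1 else if t = [')'] then c - 1 else c) =
      c + pvDelta t := by
  by_cases hl : pvIsLab t = true
  · rw [if_pos ((labGet t).mpr hl), pvDelta_of_lab t hl]
  · have hl' : ¬ (PySem.List.pyGet? t 0 = some '(') := by rw [labGet]; simpa using hl
    rw [if_neg hl']
    by_cases ht : t = [')']
    · subst ht; rw [if_pos rfl, pvDelta_close]; omega
    · rw [if_neg ht, pvDelta_of_other t (by simpa using hl) ht]; omega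

theorem scanA_some (ps : List (List Char)) (m : Nat) (hm : m < ps.length)
    (h0 : pvSig ps (m + 1) = 0) (hmin : ∀ k, k < m → pvSig ps (k + 1) ≠ 0) :
    ppScanA ps ps 0 0 = some (ps.take m) := by
  have key : ∀ d j, j ≤ m → m - j = d →
      ppScanA ps (ps.drop j) j (pvSig ps j) = some (ps.take m) := by
    intro d
    induction d with
    | zero =>
      intro j hj hd
      have hjm : j = m := by omega
      subst hjm
      rw [List.drop_eq_getElem_cons hm]
      simp only [ppScanA]
      rw [scanStep]
      have hs : pvSig ps j + pvDelta ps[j] = pvSig ps (j + 1) := by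
        rw [pvSig_succ ps j hm, List.getD_eq_getElem ps [] hm]
      rw [hs, if_pos h0]
      rw [PySem.List.slice_to ps (by omega)]
      simp
    | succ d ih =>
      intro j hj hd
      have hjm : j < m := by omega
      have hjlen : j < ps.length := by omega
      rw [List.drop_eq_getElem_cons hjlen]
      simp only [ppScanA]
      rw [scanStep]
      have hs : pvSig ps j + pvDelta ps[j] = pvSig ps (j + 1) := by
        rw [pvSig_succ ps j hjlen, List.getD_eq_getElem ps [] hjlen]
      rw [hs, if_neg (hmin j hjm)]
      exact ih (j + 1) (by omega) (by omega)
  have := key m 0 (by omega) rfl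
  simpa [pvSig_zero] using this

theorem pvCleanTok_none_of_lab (t : List Char) (h : pvIsLab t = true) : pvCleanTok t = none := by
  simp [pvCleanTok, h]

-- A's three cleaning passes are one filterMap
theorem threepass (l : List (List Char)) :
    ((l.filter (fun w => ¬ (PySem.List.pyGet? w 0 = some '('))).map
        (fun w => PySem.Chars.replace w [')'] [])).filter (fun w => ¬ (w = [])) =
      l.filterMap pvCleanTok := by
  induction l with
  | nil => simp
  | cons t l ih =>
    by_cases hl : pvIsLab t = true
    · have h1 : PySem.List.pyGet? t 0 = some '(' := (labGet t).mpr hl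
      rw [List.filter_cons_of_neg (by simp [h1]),
        List.filterMap_cons_none (pvCleanTok_none_of_lab t hl), ih]
    · have hl' : pvIsLab t = false := by simpa using hl
      have h1 : ¬ (PySem.List.pyGet? t 0 = some '(') := by rw [labGet]; simp [hl']
      rw [List.filter_cons_of_pos (by simp [h1]), List.map_cons]
      by_cases hr : PySem.Chars.replace t [')'] [] = []
      · rw [List.filter_cons_of_neg (by simp [hr]),
          List.filterMap_cons_none (by simp [pvCleanTok, hl', hr]), ih]
      · have hsome : pvCleanTok t = some (PySem.Chars.replace t [')'] []) := by
          simp [pvCleanTok, hl', hr]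
        rw [List.filter_cons_of_pos (by simp [hr]), List.filterMap_cons_some hsome, ih]

-- word-segment lemmas
theorem pvWordsSeg_nil (toks : List (List Char)) (a b : Nat) (h : b ≤ a) :
    pvWordsSeg toks a b = [] := by
  unfold pvWordsSeg
  have hz : b - a = 0 := by omega
  simp [hz]

theorem pvWordsSeg_split (toks : List (List Char)) (a m b : Nat) (h1 : a ≤ m) (h2 : m ≤ b) :
    pvWordsSeg toks a b = pvWordsSeg toks a m ++ pvWordsSeg toks m b := by
  unfold pvWordsSeg
  have hba : b - a = (m - a) + (b - m) := by omega
  rw [hba, List.take_add, List.filterMap_append, List.drop_drop]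
  have ham : a + (m - a) = m := by omega
  rw [ham]

theorem pvWordsSeg_one (toks : List (List Char)) (a : Nat) (h : a < toks.length) :
    pvWordsSeg toks a (a + 1) = (pvCleanTok (toks.getD a [])).toList := by
  unfold pvWordsSeg
  have h1 : (a + 1) - a = 1 := by omega
  rw [h1, List.drop_eq_getElem_cons h, List.take_succ_cons, List.take_zero,
    List.getD_eq_getElem toks [] h]
  cases hc : pvCleanTok toks[a] <;> simp [hc]

-- spec-segment lemmas
theorem pvSpecSeg_stop (toks : List (List Char)) (a b : Nat) (h : b ≤ a) :
    pvSpecSeg toks a b = [] := by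
  rw [pvSpecSeg, if_neg (by omega)]

theorem pvSpecSeg_lab (toks : List (List Char)) (a b : Nat) (h : a < b)
    (hl : pvIsLab (toks.getD a []) = true) :
    pvSpecSeg toks a b = pvEntry toks a :: pvSpecSeg toks (a + 1) b := by
  rw [pvSpecSeg, if_pos h, if_pos hl]
  rfl

theorem pvSpecSeg_nolab (toks : List (List Char)) (a b : Nat) (h : a < b)
    (hl : pvIsLab (toks.getD a []) = false) :
    pvSpecSeg toks a b = pvSpecSeg toks (a + 1) b := by
  rw [pvSpecSeg, if_pos h, if_neg (fun hc => Bool.false_ne_true (hl ▸ hc))]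
  rfl

theorem pvSpecSeg_split (toks : List (List Char)) (a m b : Nat) (h1 : a ≤ m) (h2 : m ≤ b) :
    pvSpecSeg toks a b = pvSpecSeg toks a m ++ pvSpecSeg toks m b := by
  have key : ∀ d a, a ≤ m → m - a = d →
      pvSpecSeg toks a b = pvSpecSeg toks a m ++ pvSpecSeg toks m b := by
    intro d
    induction d with
    | zero =>
      intro a ha hd
      have : a = m := by omega
      subst this
      rw [pvSpecSeg_stop toks a a (le_refl a)]
      simp
    | succ d ih =>
      intro a ha hd
      have ham : a < m := by omega
      have hab : a < b := by omega
      by_cases hl : pvIsLab (toks.getD a []) = true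
      · rw [pvSpecSeg_lab toks a b hab hl, pvSpecSeg_lab toks a m ham hl,
          ih (a + 1) (by omega) (by omega)]
        simp
      · have hl' : pvIsLab (toks.getD a []) = false := by simpa using hl
        rw [pvSpecSeg_nolab toks a b hab hl', pvSpecSeg_nolab toks a m ham hl',
          ih (a + 1) (by omega) (by omega)]
  exact key (m - a) a h1 rfl

theorem transB_drop (rest : List Char) : ∀ c : Char,
    (c :: rest.flatMap (fun d => if d = ')' then [' ', d] else [d])).dropLast ++ [')'] =
      pvTransGo c rest := by
  induction rest with
  | nil => intro c; simp [pvTransGo]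
  | cons d rest ih =>
    intro c
    rw [List.flatMap_cons]
    have hsh : c :: ((if d = ')' then [' ', d] else [d]) ++
        rest.flatMap (fun d => if d = ')' then [' ', d] else [d])) =
        (if d = ')' then [c, ' '] else [c]) ++
          (d :: rest.flatMap (fun d => if d = ')' then [' ', d] else [d])) := by
      split_ifs <;> simp
    rw [hsh, List.dropLast_append_cons, List.append_assoc, ih d, pvTransGo]

-- both tokenizations compute pvToks
theorem transA_go (cs : List Char) : ∀ d k (po : List Char), k < cs.length →
    cs.length - 1 - k = d →
    ((PySem.List.pyRange (k : Int) (PySem.List.len cs - 1) 1).foldl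
      (fun (po : List Char) i =>
        if PySem.List.pyGetD cs (i + 1) ' ' = ')' then
          (po ++ [PySem.List.pyGetD cs i ' ']) ++ [' ']
        else po ++ [PySem.List.pyGetD cs i ' ']) po) ++ [')'] =
      po ++ pvTransGo (cs.getD k ' ') (cs.drop (k + 1)) := by
  intro d
  induction d with
  | zero =>
    intro k po hk hd
    have hk1 : k = cs.length - 1 := by omega
    have hempty : PySem.List.pyRange (k : Int) (PySem.List.len cs - 1) 1 = [] := by
      apply PySem.List.pyRange_one_eq_nil
      simp [PySem.List.len_eq]
      omega
    rw [hempty]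
    have hdrop : cs.drop (k + 1) = [] := by
      apply List.drop_eq_nil_of_le
      omega
    rw [hdrop]
    simp [pvTransGo]
  | succ d ih =>
    intro k po hk hd
    have hklt : (k : Int) < PySem.List.len cs - 1 := by
      simp [PySem.List.len_eq]
      omega
    rw [PySem.List.pyRange_one_cons hklt, List.foldl_cons]
    have hcast : (k : Int) + 1 = ((k + 1 : Nat) : Int) := by push_cast; ring
    have hget1 : PySem.List.pyGetD cs ((k : Int) + 1) ' ' = cs.getD (k + 1) ' ' := by
      rw [hcast, PySem.List.pyGetD_natCast]
    have hget0 : PySem.List.pyGetD cs (k : Int) ' ' = cs.getD k ' ' := by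
      rw [PySem.List.pyGetD_natCast]
    have hk1 : k + 1 < cs.length := by omega
    have hdrop : cs.drop (k + 1) = cs.getD (k + 1) ' ' :: cs.drop (k + 2) := by
      rw [List.drop_eq_getElem_cons hk1, List.getD_eq_getElem cs ' ' hk1]
    rw [hget1, hget0, hdrop]
    show _ = po ++ pvTransGo (cs.getD k ' ') (cs.getD (k + 1) ' ' :: cs.drop (k + 2))
    rw [pvTransGo]
    by_cases hc : cs.getD (k + 1) ' ' = ')'
    · rw [if_pos hc, if_pos hc]
      have := ih (k + 1) ((po ++ [cs.getD k ' ']) ++ [' ']) hk1 (by omega)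
      rw [hcast, this]
      simp
    · rw [if_neg hc, if_neg hc]
      have := ih (k + 1) (po ++ [cs.getD k ' ']) hk1 (by omega)
      rw [hcast, this]
      simp

theorem tokA_eq (parse : String) : ppTokensA parse = pvToks parse := by
  unfold ppTokensA pvToks
  cases hcs : parse.toList with
  | nil =>
    dsimp only
    have hempty : PySem.List.pyRange 0 (PySem.List.len ([] : List Char) - 1) 1 = [] := by
      apply PySem.List.pyRange_one_eq_nil
      simp [PySem.List.len_eq]
    rw [hempty]
    simp [pvTrans]
  | cons c rest =>
    dsimp only
    have := transA_go (c :: rest) ((c :: rest).length - 1 - 0) 0 [] (by simp) rfl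
    push_cast at this
    rw [this]
    rw [show pvTrans (c :: rest) =
      (c :: rest.flatMap (fun d => if d = ')' then [' ', d] else [d])).dropLast ++ [')']
      from rfl, transB_drop rest c]
    simp

theorem enumB_tail (cs : List Char) : ∀ (s : Int), 1 ≤ s →
    (PySem.List.enumerate cs s).flatMap
      (fun ic => if ic.2 = ')' ∧ 0 < ic.1 then [' ', ic.2] else [ic.2]) =
    cs.flatMap (fun d => if d = ')' then [' ', d] else [d]) := by
  induction cs with
  | nil => intro s hs; simp [PySem.List.enumerate]
  | cons c cs ih =>
    intro s hs
    have hcons : PySem.List.enumerate (c :: cs) s = (s, c) :: PySem.List.enumerate cs (s + 1) := by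
      simp [PySem.List.enumerate]
    rw [hcons, List.flatMap_cons, List.flatMap_cons, ih (s + 1) (by omega)]
    have hpos : (0 : Int) < s := by omega
    by_cases hc : c = ')'
    · rw [if_pos ⟨hc, hpos⟩, if_pos hc]
    · rw [if_neg (by tauto), if_neg hc]

theorem tokB_eq (parse : String) : ppTokensB parse = pvToks parse := by
  unfold ppTokensB pvToks
  cases hcs : parse.toList with
  | nil =>
    dsimp only
    simp [PySem.List.enumerate, PySem.List.slice_to_neg_one, pvTrans]
  | cons c rest =>
    dsimp only
    have hcons : PySem.List.enumerate (c :: rest) 0 = (0, c) :: PySem.List.enumerate rest 1 := by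
      simp [PySem.List.enumerate]
    rw [hcons, List.flatMap_cons]
    have hhead : (if c = ')' ∧ (0 : Int) < 0 then [' ', c] else [c]) = [c] := by
      simp
    rw [hhead, enumB_tail rest 1 (by omega), PySem.List.slice_to_neg_one]
    rw [show [c] ++ rest.flatMap (fun d => if d = ')' then [' ', d] else [d]) =
      c :: rest.flatMap (fun d => if d = ')' then [' ', d] else [d]) from rfl]
    rw [transB_drop rest c,
      show pvTrans (c :: rest) =
        (c :: rest.flatMap (fun d => if d = ')' then [' ', d] else [d])).dropLast ++ [')']
        from rfl, transB_drop rest c]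

-- A's inner scan at a label that closes at j
theorem close_scan (toks : List (List Char)) (i j : Nat) (hc : pvCloseAt toks i j) :
    ppScanA (toks.drop i) (toks.drop i) 0 0 = some ((toks.drop i).take (j - i)) := by
  obtain ⟨hij, hjn, heq, hne⟩ := hc
  apply scanA_some
  · simp; omega
  · rw [pvSig_drop]
    have h1 : i + (j - i + 1) = j + 1 := by omega
    rw [h1, heq]
    ring
  · intro k hk
    rw [pvSig_drop]
    have h2 : pvSig toks (i + (k + 1)) ≠ pvSig toks i := by
      have := hne (i + k) (List.mem_range.mpr (by omega)) (by omega)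
      have h3 : i + k + 1 = i + (k + 1) := by omega
      rwa [h3] at this
    omega

-- one step of A's outer loop, label case, all labels balanced
theorem stepA_lab (toks : List (List Char)) (k j : Nat) (hk : k < toks.length)
    (hl : pvIsLab (toks.getD k []) = true) (hc : pvCloseAt toks k j)
    (acc : List (String × List String)) (st : Option (List (List Char))) :
    ppStepA toks (acc, st) (k : Int) =
      (acc ++ [pvEntry toks k], some (pvWordsSeg toks (k + 1) j)) := by
  unfold ppStepA
  dsimp only
  rw [PySem.List.pyGetD_natCast, if_pos ((labGet _).mpr hl), PySem.List.slice_from_natCast,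
    close_scan toks k j hc]
  have hkj : k < j := hc.1
  have htake : (toks.drop k).take (j - k) =
      toks.getD k [] :: (toks.drop (k + 1)).take (j - (k + 1)) := by
    have h1 : j - k = (j - (k + 1)) + 1 := by omega
    rw [h1, List.drop_eq_getElem_cons hk, List.take_succ_cons, List.getD_eq_getElem toks [] hk]
  rw [htake, threepass, List.filterMap_cons_none (pvCleanTok_none_of_lab _ hl)]
  rw [pvEntry, pvCloseIdx_eq toks k j hc]
  rfl

-- one step of A's outer loop, non-label case
theorem stepA_nolab (toks : List (List Char)) (k : Nat)
    (hl : pvIsLab (toks.getD k []) = false)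
    (acc : List (String × List String)) (st : Option (List (List Char))) :
    ppStepA toks (acc, st) (k : Int) = (acc, st) := by
  unfold ppStepA
  dsimp only
  rw [PySem.List.pyGetD_natCast, if_neg (by rw [labGet]; simpa using hl)]

theorem foldA_allBal (toks : List (List Char))
    (hbal : ∀ p, p < toks.length → pvIsLab (toks.getD p []) = true → pvBal toks p) :
    ∀ d k (acc : List (String × List String)) (st : Option (List (List Char))),
      toks.length - k = d → k ≤ toks.length →
      ((PySem.List.pyRange (k : Int) (PySem.List.len toks) 1).foldl (ppStepA toks) (acc, st)).1 =
        acc ++ pvSpecSeg toks k toks.length := by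
  intro d
  induction d with
  | zero =>
    intro k acc st hd hk
    have hkn : k = toks.length := by omega
    rw [PySem.List.pyRange_one_eq_nil (by simp [PySem.List.len_eq]; omega)]
    rw [pvSpecSeg_stop toks k toks.length (by omega)]
    simp
  | succ d ih =>
    intro k acc st hd hk
    have hkn : k < toks.length := by omega
    rw [PySem.List.pyRange_one_cons (by simp [PySem.List.len_eq]; omega), List.foldl_cons]
    have hcast : (k : Int) + 1 = ((k + 1 : Nat) : Int) := by push_cast; ring
    rw [hcast]
    by_cases hl : pvIsLab (toks.getD k []) = true
    · obtain ⟨j, hc⟩ := pvBal_close toks k hl hkn (hbal k hkn hl)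
      rw [stepA_lab toks k j hkn hl hc acc st]
      rw [ih (k + 1) (acc ++ [pvEntry toks k]) (some (pvWordsSeg toks (k + 1) j))
        (by omega) (by omega)]
      rw [pvSpecSeg_lab toks k toks.length hkn hl]
      simp
    · have hl' : pvIsLab (toks.getD k []) = false := by simpa using hl
      rw [stepA_nolab toks k hl' acc st]
      rw [ih (k + 1) acc st (by omega) (by omega)]
      rw [pvSpecSeg_nolab toks k toks.length hkn hl']

-- the closing token of a region is ')'
theorem close_tok (toks : List (List Char)) (i j : Nat)
    (hl : pvIsLab (toks.getD i []) = true) (hc : pvCloseAt toks i j) :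
    toks.getD j [] = [')'] ∧ pvIsLab (toks.getD j []) = false := by
  have hgt := close_gt toks i j hl hc
  have hj : pvSig toks i < pvSig toks j := hgt j hc.1 (le_refl j)
  have hs : pvSig toks (j + 1) = pvSig toks j + pvDelta (toks.getD j []) :=
    pvSig_succ toks j hc.2.1
  have hneg : pvDelta (toks.getD j []) < 0 := by
    have := hc.2.2.1
    omega
  exact eq_close_of_delta_neg _ hneg

theorem cleanTok_close : pvCleanTok [')'] = none := by decide

-- B's recursive descent, all labels balanced
theorem BRL (toks : List (List Char))
    (hbal : ∀ p, p < toks.length → pvIsLab (toks.getD p []) = true → pvBal toks p) :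
    ∀ fuel : Nat,
      (∀ i j, pvCloseAt toks i j → pvIsLab (toks.getD i []) = true → 2 * (j - i) ≤ fuel →
        ppRegionB toks fuel i =
          (pvEntry toks i :: pvSpecSeg toks (i + 1) j,
           (pvWordsSeg toks (i + 1) j).map String.ofList, j + 1)) ∧
      (∀ a b (w : List String) (e : List (String × List String)), a ≤ b → b < toks.length →
        pvSig toks (b + 1) = pvSig toks a - 1 →
        (∀ m, a ≤ m → m ≤ b → pvSig toks a ≤ pvSig toks m) →
        2 * (b - a) + 1 ≤ fuel →
        ppLoopB toks fuel a w e =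
          (e ++ pvSpecSeg toks a b, w ++ (pvWordsSeg toks a b).map String.ofList, b + 1)) := by
  intro fuel
  induction fuel with
  | zero =>
    constructor
    · intro i j hc hl hf
      have := hc.1
      omega
    · intro a b w e hab hbn h1 h2 hf
      omega
  | succ f ih =>
    constructor
    · -- region
      intro i j hc hl hf
      have hij := hc.1
      have hjn := hc.2.1
      have hin : i < toks.length := by omega
      have hσ1 : pvSig toks (i + 1) = pvSig toks i + 1 := by
        rw [pvSig_succ toks i hin, pvDelta_of_lab _ hl]
      have hgt := close_gt toks i j hl hc
      have hσj := hc.2.2.1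
      have hloop := ih.2 (i + 1) j [] [] (by omega) hjn
        (by rw [hσ1]; omega)
        (by intro m hm1 hm2; have := hgt m (by omega) hm2; omega)
        (by omega)
      simp only [ppRegionB]
      rw [PySem.List.pyGetD_natCast, hloop]
      rw [pvEntry, pvCloseIdx_eq toks i j hc]
      simp
    · -- loop
      intro a b w e hab hbn hσb hσge hf
      have han : a < toks.length := by omega
      simp only [ppLoopB]
      rw [dif_pos han]
      by_cases haeb : a = b
      · subst haeb
        have hs := pvSig_succ toks a han
        have hge := hσge a (le_refl a) (le_refl a)
        have hneg : pvDelta (toks.getD a []) < 0 := by omega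
        obtain ⟨htok, hnl⟩ := eq_close_of_delta_neg _ hneg
        have htok' : toks[a] = [')'] := by
          rw [← List.getD_eq_getElem toks [] han]; exact htok
        rw [if_neg (by rw [htok']; decide), if_pos htok']
        rw [pvSpecSeg_stop toks a a (le_refl a), pvWordsSeg_nil toks a a (le_refl a)]
        simp
      · have hab' : a < b := by omega
        have hσa1 : pvSig toks a ≤ pvSig toks (a + 1) := hσge (a + 1) (by omega) (by omega)
        have hsucc := pvSig_succ toks a han
        by_cases hl : pvIsLab (toks.getD a []) = true
        · obtain ⟨ja, hcja⟩ := pvBal_close toks a hl han (hbal a han hl)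
          have hgt := close_gt toks a ja hl hcja
          have hσja1 : pvSig toks (ja + 1) = pvSig toks a := hcja.2.2.1
          have hja0 := hcja.1
          have hjab : ja < b := by
            by_contra hge
            push_neg at hge
            rcases Nat.eq_or_lt_of_le hge with heq | hlt
            · have : pvSig toks (b + 1) = pvSig toks a := by rw [heq]; exact hσja1
              omega
            · have := hgt (b + 1) (by omega) (by omega)
              omega
          have hregion := ih.1 a ja hcja hl (by omega)
          have hloop := ih.2 (ja + 1) b
            (w ++ (pvWordsSeg toks (a + 1) ja).map String.ofList)
            (e ++ (pvEntry toks a :: pvSpecSeg toks (a + 1) ja)) (by omega) hbn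
            (by rw [hσja1]; omega)
            (by intro m hm1 hm2; rw [hσja1]; exact hσge m (by omega) hm2)
            (by omega)
          have hlab_elem : pvIsLab toks[a] = true := by
            rw [← List.getD_eq_getElem toks [] han]; exact hl
          rw [if_pos ((labSlice _).mpr hlab_elem), hregion]
          dsimp only
          rw [hloop]
          obtain ⟨htokja, hnlja⟩ := close_tok toks a ja hl hcja
          have hE : pvSpecSeg toks a b =
              (pvEntry toks a :: pvSpecSeg toks (a + 1) ja) ++ pvSpecSeg toks (ja + 1) b := by
            rw [pvSpecSeg_lab toks a b hab' hl,
              pvSpecSeg_split toks (a + 1) ja b (by omega) (by omega),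
              pvSpecSeg_nolab toks ja b (by omega) hnlja]
            simp
          have hW : pvWordsSeg toks a b =
              pvWordsSeg toks (a + 1) ja ++ pvWordsSeg toks (ja + 1) b := by
            rw [pvWordsSeg_split toks a (a + 1) b (by omega) (by omega),
              pvWordsSeg_split toks (a + 1) ja b (by omega) (by omega),
              pvWordsSeg_split toks ja (ja + 1) b (by omega) (by omega),
              pvWordsSeg_one toks a han, pvWordsSeg_one toks ja (by omega),
              pvCleanTok_none_of_lab _ hl, htokja, cleanTok_close]
            simp
          rw [hE, hW]
          simp
        · have hl' : pvIsLab (toks.getD a []) = false := by simpa using hl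
          have hnl_elem : pvIsLab toks[a] = false := by
            rw [← List.getD_eq_getElem toks [] han]; exact hl'
          have hg1 : ¬ (PySem.Chars.slice toks[a] none (some 1) = ['(']) := by
            intro hcc
            have h2 := (labSlice _).mp hcc
            rw [hnl_elem] at h2
            exact Bool.false_ne_true h2
          have htd : toks.getD a [] = toks[a] := List.getD_eq_getElem toks [] han
          have htok_ne : ¬ (toks[a] = [')']) := by
            intro hq
            have hδ : pvDelta (toks.getD a []) = -1 := by
              rw [htd, hq]; exact pvDelta_close
            omega
          rw [if_neg hg1, if_neg htok_ne]
          have hδ0 : pvDelta (toks.getD a []) = 0 := by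
            apply pvDelta_of_other _ hl'
            rw [htd]; exact htok_ne
          have hσ1 : pvSig toks (a + 1) = pvSig toks a := by omega
          have hWone : pvWordsSeg toks a (a + 1) = (pvCleanTok (toks.getD a [])).toList :=
            pvWordsSeg_one toks a han
          have hWsplit : pvWordsSeg toks a b =
              pvWordsSeg toks a (a + 1) ++ pvWordsSeg toks (a + 1) b :=
            pvWordsSeg_split toks a (a + 1) b (by omega) (by omega)
          have hEsplit : pvSpecSeg toks a b = pvSpecSeg toks (a + 1) b :=
            pvSpecSeg_nolab toks a b hab' hl'
          by_cases hr : PySem.Chars.replace toks[a] [')'] [] = []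
          · rw [if_pos hr]
            have hloop := ih.2 (a + 1) b w e (by omega) hbn
              (by rw [hσ1]; omega)
              (by intro m hm1 hm2; rw [hσ1]; exact hσge m (by omega) hm2)
              (by omega)
            rw [hloop, hEsplit, hWsplit, hWone]
            have hct : pvCleanTok (toks.getD a []) = none := by
              rw [htd]
              unfold pvCleanTok
              rw [if_neg (fun hcc => Bool.false_ne_true (hnl_elem ▸ hcc)), if_pos hr]
            rw [hct]
            simp
          · rw [if_neg hr]
            have hloop := ih.2 (a + 1) b
              (w ++ [String.ofList (PySem.Chars.replace toks[a] [')'] [])]) e (by omega) hbn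
              (by rw [hσ1]; omega)
              (by intro m hm1 hm2; rw [hσ1]; exact hσge m (by omega) hm2)
              (by omega)
            rw [hloop, hEsplit, hWsplit, hWone]
            have hct : pvCleanTok (toks.getD a []) =
                some (PySem.Chars.replace toks[a] [')'] []) := by
              rw [htd]
              unfold pvCleanTok
              rw [if_neg (fun hcc => Bool.false_ne_true (hnl_elem ▸ hcc)), if_neg hr]
            rw [hct]
            simp

theorem topB_allBal (toks : List (List Char))
    (hbal : ∀ p, p < toks.length → pvIsLab (toks.getD p []) = true → pvBal toks p) :
    ∀ fuel i (acc : List (String × List String)), 2 * (toks.length - i) + 2 ≤ fuel →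
      ppTopB toks fuel i acc = acc ++ pvSpecSeg toks i toks.length := by
  intro fuel
  induction fuel with
  | zero => intro i acc hf; omega
  | succ f ih =>
    intro i acc hf
    simp only [ppTopB]
    by_cases hi : i < toks.length
    · rw [dif_pos hi]
      by_cases hl : pvIsLab (toks.getD i []) = true
      · obtain ⟨j, hc⟩ := pvBal_close toks i hl hi (hbal i hi hl)
        have hjn : j < toks.length := hc.2.1
        have hij := hc.1
        have hlab_elem : pvIsLab toks[i] = true := by
          rw [← List.getD_eq_getElem toks [] hi]; exact hl
        rw [if_pos ((labSlice _).mpr hlab_elem)]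
        rw [(BRL toks hbal f).1 i j hc hl (by omega)]
        dsimp only
        rw [ih (j + 1) (acc ++ (pvEntry toks i :: pvSpecSeg toks (i + 1) j)) (by omega)]
        obtain ⟨htokj, hnlj⟩ := close_tok toks i j hl hc
        rw [pvSpecSeg_lab toks i toks.length hi hl,
          pvSpecSeg_split toks (i + 1) j toks.length (by omega) (by omega),
          pvSpecSeg_nolab toks j toks.length (by omega) hnlj]
        simp
      · have hl' : pvIsLab (toks.getD i []) = false := by simpa using hl
        have hnl_elem : pvIsLab toks[i] = false := by
          rw [← List.getD_eq_getElem toks [] hi]; exact hl'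
        rw [if_neg (fun hcc => Bool.false_ne_true (hnl_elem ▸ (labSlice _).mp hcc))]
        rw [ih (i + 1) acc (by omega), pvSpecSeg_nolab toks i toks.length hi hl']
    · rw [dif_neg hi, pvSpecSeg_stop toks i toks.length (by omega)]
      simp

theorem pv_main : ∀ (parse : String), Pre_process_parse parse →
    process_parse parse = process_parse_alt parse := by
  intro parse hpre
  obtain ⟨hne, hbal'⟩ := hpre
  have hbal : ∀ p, p < (pvToks parse).length →
      pvIsLab ((pvToks parse).getD p []) = true → pvBal (pvToks parse) p := by
    intro p hp hl
    exact hbal' p (List.mem_range.mpr hp) hl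
  unfold process_parse process_parse_alt
  dsimp only
  rw [tokA_eq parse, tokB_eq parse]
  unfold ppOuterA
  have hA := foldA_allBal (pvToks parse) hbal ((pvToks parse).length) 0 [] none
    (by omega) (by omega)
  push_cast at hA
  rw [hA, topB_allBal (pvToks parse) hbal (2 * (pvToks parse).length + 2) 0 [] (by omega)]

-- ===== VERDICT (by name: the statement is the Claim_ definition above) =====
theorem process_parse_spec : Claim_equal_process_parse := by
  intro parse _ hpre
  unfold Spec_process_parse
  exact pv_main parse hpre
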